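-- pv_equiv track=rewrite | github.com/jatufin/lausegeneraattori | src/output_diagnose.py | get_following_word_occurences_for_all_prefixes
-- ===== SOURCE A (Python) =====
-- def get_following_word_occurences(wordlist, prefix):
--     """Count the appearances of different words after given prefix
--
--     Args:
--         wordlist : List of strings
--         prefix : List of strings
--
--     Returns:
--         Dictionary of strings (words) as keys and integers (occurences)
--         as values.
--
--     Example:
--         Args:
--             wordlist = ["aa", "bb", "cc", "bb", "dd", "aa", "bb", "cc", "aa", "bb", "aa"]
--             prefix = ["aa", "bb"]
--         Returns:
--             {"cc" : 2, "aa": 1}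
--     """
--     return_dict = {}
--
--     prefix_length = len(prefix)
--
--     for i in range(len(wordlist) - prefix_length):
--
--         if wordlist[i:i+prefix_length] == list(prefix):  # prefix migth be list or tuple
--
--             following_word = wordlist[i+prefix_length]
--             if following_word in return_dict:
--                 return_dict[following_word] += 1
--             else:
--                 return_dict[following_word] = 1
--
--     return return_dict
--
-- def get_following_word_occurences_for_all_prefixes(wordlist, length):
--     """Count the appearances of different words after given prefix
--
--     Args:
--         wordlist : List of strings
--         length : Integer. Length of prefixes
--
--     Returns:
--         Dictionary of dictionaries, where keys are tuples of strings (prefixes)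
--         and values are dictionaries from get_following_word_occurences() method
--         as values. The wordlist is split to length long pieces, and for each,
--         the occurences of following words are counted
--
--     Example:
--         Args:
--             wordlist = ["aa", "bb", "cc", "bb", "dd", "aa", "bb", "cc", "aa", "bb", "aa"]
--             length = 3
--         Returns:
--             {("aa", "bb", "cc"): {"bb": 1, "aa": 1},
--              ("bb", "cc", "bb"): {"dd": 1},
--              ("cc", "bb", "dd"): {"aa": 1},
--              ("bb", "dd", "aa"): {"bb": 1},
--              ("dd", "aa", "bb"): {"cc": 1},
--              ("bb", "cc", "aa"): {"bb": 1},
--              ("cc", "aa", "bb"): {"aa": 1}}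
--
--     """
--     return_dict = {}
--
--     for i in range(len(wordlist) - length - 1):
--         prefix = wordlist[i:i+length]
--
--         prefix_as_tuple = tuple(prefix)
--
--         if prefix_as_tuple not in return_dict:
--             return_dict[prefix_as_tuple] = get_following_word_occurences(wordlist, prefix)
--
--     return return_dict
-- ===== SOURCE B (Python) =====
-- def get_following_word_occurences_for_all_prefixes(wordlist, length):
--     n = len(wordlist)
--     # single sliding pass: group every (window, follower) event by window
--     counts = {}
--     for i in range(n - length):
--         p = tuple(wordlist[i:i+length])
--         d = counts.get(p, {})
--         d[wordlist[i+length]] = d.get(wordlist[i+length], 0) + 1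
--         counts[p] = d
--     # second linear pass: emit the included prefixes in first-occurrence order
--     result = {}
--     for i in range(n - length - 1):
--         p = tuple(wordlist[i:i+length])
--         if p not in result:
--             result[p] = counts[p]
--     return result
-- ===== Notes on version B (the rewrite author's own statement) =====
-- stated objective: faster
-- what changed: A rescans the whole word list once per distinct prefix (calling get_following_word_occurences for each); B makes one sliding pass that groups every (window, follower) event into a dict of counters, then a second linear pass that emits the included prefixes in first-occurrence order.
-- outside the precondition, e.g. on get_following_word_occurences_for_all_prefixes(['a'], -2): A returns {(): {'a': 1}}, B raises IndexError
import Mathlib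
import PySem

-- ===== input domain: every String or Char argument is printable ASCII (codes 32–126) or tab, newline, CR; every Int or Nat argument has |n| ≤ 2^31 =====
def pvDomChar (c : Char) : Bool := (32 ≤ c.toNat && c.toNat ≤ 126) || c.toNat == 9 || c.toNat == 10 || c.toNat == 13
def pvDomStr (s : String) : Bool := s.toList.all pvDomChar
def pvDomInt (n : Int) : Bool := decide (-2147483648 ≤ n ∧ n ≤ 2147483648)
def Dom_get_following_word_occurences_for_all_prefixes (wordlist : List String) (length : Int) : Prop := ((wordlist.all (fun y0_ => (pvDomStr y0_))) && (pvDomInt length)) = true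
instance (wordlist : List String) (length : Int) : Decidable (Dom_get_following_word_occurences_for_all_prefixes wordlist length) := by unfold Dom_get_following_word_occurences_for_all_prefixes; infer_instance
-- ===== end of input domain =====

-- B replaces A's per-prefix_ rescan of the whole word list by one sliding pass that groups
-- (window, follower) events by window, then a second linear pass emitting prefixes in order.

-- ===== PORT A =====
-- helper: Python's get_following_word_occurences (literal port).
-- wordlist[i+prefix_length] never raises inside the loop (i < len - prefix_length), so pyGetD is exact here.
def pvGetFollowing (wordlist : List String) (prefix_ : List String) : PySem.Dict String Int :=
  let prefix_length : Int := (prefix_.length : Int)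
  (PySem.List.pyRange 0 ((wordlist.length : Int) - prefix_length) 1).foldl
    (fun d i =>
      if PySem.List.slice wordlist (some i) (some (i + prefix_length)) == prefix_ then
        let fw := PySem.List.pyGetD wordlist (i + prefix_length) ""
        if d.contains fw then d.modify fw 0 (· + 1) else d.insert fw 1
      else d)
    PySem.Dict.empty

def get_following_word_occurences_for_all_prefixes (wordlist : List String) (length : Int) : List (List String × List (String × Int)) :=
  let n : Int := (wordlist.length : Int)
  let return_dict : PySem.Dict (List String) (PySem.Dict String Int) :=
    (PySem.List.pyRange 0 (n - length - 1) 1).foldl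
      (fun d i =>
        let prefix_ := PySem.List.slice wordlist (some i) (some (i + length))
        if d.contains prefix_ then d else d.insert prefix_ (pvGetFollowing wordlist prefix_))
      PySem.Dict.empty
  return_dict.items.map (fun kv => (kv.1, kv.2.items))

-- ===== PORT B =====
-- counts[p] in the second pass never raises under Pre_ (every prefix_ of the second pass was grouped
-- in the first), so getD with an empty-dict default is exact there.
def get_following_word_occurences_for_all_prefixes_alt (wordlist : List String) (length : Int) : List (List String × List (String × Int)) :=
  let n : Int := (wordlist.length : Int)
  let counts : PySem.Dict (List String) (PySem.Dict String Int) :=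
    (PySem.List.pyRange 0 (n - length) 1).foldl
      (fun c i =>
        let p := PySem.List.slice wordlist (some i) (some (i + length))
        let w := PySem.List.pyGetD wordlist (i + length) ""
        c.insert p ((c.getD p PySem.Dict.empty).insert w ((c.getD p PySem.Dict.empty).getD w 0 + 1)))
      PySem.Dict.empty
  let result : PySem.Dict (List String) (PySem.Dict String Int) :=
    (PySem.List.pyRange 0 (n - length - 1) 1).foldl
      (fun r i =>
        let p := PySem.List.slice wordlist (some i) (some (i + length))
        if r.contains p then r else r.insert p (counts.getD p PySem.Dict.empty))
      PySem.Dict.empty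
  result.items.map (fun kv => (kv.1, kv.2.items))

-- ===== PRECONDITION & SPEC =====
-- Pre_ excludes negative length, a degenerate prefix_ length on which A's windows are an accident of
-- Python's negative-slice clamping; B's plain sliding window raises IndexError or groups windows
-- differently there.
def Pre_get_following_word_occurences_for_all_prefixes (wordlist : List String) (length : Int) : Prop := 0 ≤ length
instance (wordlist : List String) (length : Int) : Decidable (Pre_get_following_word_occurences_for_all_prefixes wordlist length) := by unfold Pre_get_following_word_occurences_for_all_prefixes; infer_instance

def pvWitness_get_following_word_occurences_for_all_prefixes : List String × Int :=
  (["aa", "bb", "cc", "bb", "dd", "aa", "bb", "cc", "aa", "bb", "aa"], 3)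

def Spec_get_following_word_occurences_for_all_prefixes (wordlist : List String) (length : Int) (out : List (List String × List (String × Int))) : Prop := out = get_following_word_occurences_for_all_prefixes_alt wordlist length
instance (wordlist : List String) (length : Int) (out : List (List String × List (String × Int))) : Decidable (Spec_get_following_word_occurences_for_all_prefixes wordlist length out) := by unfold Spec_get_following_word_occurences_for_all_prefixes; infer_instance

-- ===== CLAIM (what is proved, stated in full; the proofs are below) =====
def Claim_equal_get_following_word_occurences_for_all_prefixes : Prop := ∀ (wordlist : List String) (length : Int), Dom_get_following_word_occurences_for_all_prefixes wordlist length → Pre_get_following_word_occurences_for_all_prefixes wordlist length → Spec_get_following_word_occurences_for_all_prefixes wordlist length (get_following_word_occurences_for_all_prefixes wordlist length)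

-- ===== LEMMAS AND PROOFS =====

-- the stream of (window, follower) events of one sliding pass
def pvEvents (wordlist : List String) (length : Int) : List (List String × String) :=
  (PySem.List.pyRange 0 ((wordlist.length : Int) - length) 1).map
    (fun i => (PySem.List.slice wordlist (some i) (some (i + length)),
               PySem.List.pyGetD wordlist (i + length) ""))

-- grouping pass projected at one key = the filtered counting pass at that key
lemma pv_group_getD (es : List (List String × String))
    (c : PySem.Dict (List String) (PySem.Dict String Int)) (p : List String) :
    (es.foldl (fun c e =>
        c.insert e.1 ((c.getD e.1 PySem.Dict.empty).insert e.2
          ((c.getD e.1 PySem.Dict.empty).getD e.2 0 + 1))) c).getD p PySem.Dict.empty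
    = es.foldl (fun d e => if e.1 == p then d.insert e.2 (d.getD e.2 0 + 1) else d)
        (c.getD p PySem.Dict.empty) := by
  induction es generalizing c with
  | nil => rfl
  | cons e t ih =>
    simp only [List.foldl_cons]
    rw [ih]
    by_cases h : e.1 = p
    · subst h
      simp [PySem.Dict.getD_insert_self]
    · rw [PySem.Dict.getD_insert, if_neg (Ne.symm h)]
      simp [h]

-- A's helper is the filtered counting pass over the events of prefix_-length windows
lemma pv_gfwo_eq (wordlist p : List String) :
    pvGetFollowing wordlist p
    = (pvEvents wordlist (p.length : Int)).foldl
        (fun d e => if e.1 == p then d.insert e.2 (d.getD e.2 0 + 1) else d)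
        PySem.Dict.empty := by
  unfold pvGetFollowing pvEvents
  rw [List.foldl_map]
  apply PySem.List.foldl_congr_mem
  intro d i _
  by_cases h : PySem.List.slice wordlist (some i) (some (i + (p.length : Int))) == p
  · simp only [h, if_true]
    by_cases hc : d.contains (PySem.List.pyGetD wordlist (i + (p.length : Int)) "") = true
    · simp [hc]
      rfl
    · simp only [Bool.not_eq_true] at hc
      simp [hc, PySem.Dict.getD_of_not_contains]
  · simp [h]

-- the slice taken at a position of the second pass has exactly `length` words
lemma pv_slice_length (wordlist : List String) (length i : Int)
    (h0 : 0 ≤ i) (hL : 0 ≤ length) (hn : i + length ≤ (wordlist.length : Int)) :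
    ((PySem.List.slice wordlist (some i) (some (i + length))).length : Int) = length := by
  obtain ⟨a, rfl⟩ := Int.eq_ofNat_of_zero_le h0
  obtain ⟨L, rfl⟩ := Int.eq_ofNat_of_zero_le hL
  rw [PySem.List.slice_natCast_add]
  simp only [List.length_take, List.length_drop]
  have : a + L ≤ wordlist.length := by exact_mod_cast hn
  omega

theorem get_following_word_occurences_for_all_prefixes_spec : Claim_equal_get_following_word_occurences_for_all_prefixes := by
  intro wordlist length _ hpre
  unfold Spec_get_following_word_occurences_for_all_prefixes
  unfold get_following_word_occurences_for_all_prefixes get_following_word_occurences_for_all_prefixes_alt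
  simp only []
  congr 1
  congr 1
  apply PySem.List.foldl_congr_mem
  intro acc i hi
  rw [PySem.List.mem_pyRange_one] at hi
  have hlen : ((PySem.List.slice wordlist (some i) (some (i + length))).length : Int) = length :=
    pv_slice_length wordlist length i hi.1 hpre (by omega)
  have hcounts :
      ((PySem.List.pyRange 0 ((wordlist.length : Int) - length) 1).foldl
        (fun c j =>
          c.insert (PySem.List.slice wordlist (some j) (some (j + length)))
            ((c.getD (PySem.List.slice wordlist (some j) (some (j + length))) PySem.Dict.empty).insert
              (PySem.List.pyGetD wordlist (j + length) "")
              ((c.getD (PySem.List.slice wordlist (some j) (some (j + length))) PySem.Dict.empty).getD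
                (PySem.List.pyGetD wordlist (j + length) "") 0 + 1)))
        (PySem.Dict.empty : PySem.Dict (List String) (PySem.Dict String Int)))
      = (pvEvents wordlist length).foldl (fun c e =>
          c.insert e.1 ((c.getD e.1 PySem.Dict.empty).insert e.2
            ((c.getD e.1 PySem.Dict.empty).getD e.2 0 + 1))) PySem.Dict.empty := by
    unfold pvEvents
    rw [List.foldl_map]
  have hval : pvGetFollowing wordlist (PySem.List.slice wordlist (some i) (some (i + length)))
      = ((PySem.List.pyRange 0 ((wordlist.length : Int) - length) 1).foldl
        (fun c j =>
          c.insert (PySem.List.slice wordlist (some j) (some (j + length)))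
            ((c.getD (PySem.List.slice wordlist (some j) (some (j + length))) PySem.Dict.empty).insert
              (PySem.List.pyGetD wordlist (j + length) "")
              ((c.getD (PySem.List.slice wordlist (some j) (some (j + length))) PySem.Dict.empty).getD
                (PySem.List.pyGetD wordlist (j + length) "") 0 + 1)))
        (PySem.Dict.empty : PySem.Dict (List String) (PySem.Dict String Int))).getD (PySem.List.slice wordlist (some i) (some (i + length))) PySem.Dict.empty := by
    rw [pv_gfwo_eq, hlen]
    have hg := pv_group_getD (pvEvents wordlist length) PySem.Dict.empty
      (PySem.List.slice wordlist (some i) (some (i + length)))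
    rw [← hcounts] at hg
    exact hg.symm
  rw [hval]
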